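-- pv_equiv track=rewrite | github.com/Breinzy/poke-quant | src/pokequant/scraping/ebay/search_generator_enhanced.py | _generate_ebay_card_terms
-- ===== SOURCE A (Python) =====
-- from typing import List, Dict, Any, Optional
--
-- def _generate_ebay_card_terms(card_name: str, set_name: str, card_number: str) -> List[str]:
--     """Generate very specific, exact terms for eBay searches (no generic terms!)"""
--     terms = []
--
--     # NEVER use generic terms on eBay - be very specific!
--     base_search = f"{card_name}"
--     if card_number:
--         base_search += f" {card_number}"
--     if set_name:
--         base_search += f" {set_name}"
--
--     # Specific condition searches (most targeted)
--     if set_name and card_number: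
--         terms.append(f"{card_name} {card_number} {set_name} near mint")
--         terms.append(f"{card_name} {card_number} {set_name} nm")
--         terms.append(f"{card_name} {card_number} {set_name} mint")
--
--     # Specific grading searches
--     grading_terms = ["psa 10", "psa 9", "bgs 10", "cgc 10"]
--     for grade in grading_terms:
--         if set_name and card_number:
--             terms.append(f"{card_name} {card_number} {set_name} {grade}")
--         elif set_name:
--             terms.append(f"{card_name} {set_name} {grade}")
--
--     # Base exact search (no generic keywords)
--     if set_name and card_number:
--         terms.append(f"{card_name} {card_number} {set_name}")
--     elif set_name:
--         terms.append(f"{card_name} {set_name}")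
--
--     return terms
-- ===== SOURCE B (Python) =====
-- _CONDITION_SUFFIXES = ("near mint", "nm", "mint")
-- _MASTER_SUFFIXES = _CONDITION_SUFFIXES + ("psa 10", "psa 9", "bgs 10", "cgc 10", "")
--
-- def _generate_ebay_card_terms(card_name: str, set_name: str, card_number: str) -> list:
--     """Filter a master suffix table and build each term from its token list."""
--     out = []
--     for suffix in _MASTER_SUFFIXES:
--         if not set_name:
--             continue
--         if not card_number and suffix in _CONDITION_SUFFIXES:
--             continue
--         tokens = [card_name]
--         if card_number:
--             tokens.append(card_number)
--         tokens.append(set_name)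
--         if suffix:
--             tokens.append(suffix)
--         out.append(" ".join(tokens))
--     return out
-- ===== Notes on version B (the rewrite author's own statement) =====
-- stated objective: alternative
-- what changed: Replaces A's base_search accumulator, three conditional append blocks and grading loop with a single filtered pass over one master suffix table, building each term from its own token list joined with ' ' instead of prebuilt prefix strings.
import Mathlib
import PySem

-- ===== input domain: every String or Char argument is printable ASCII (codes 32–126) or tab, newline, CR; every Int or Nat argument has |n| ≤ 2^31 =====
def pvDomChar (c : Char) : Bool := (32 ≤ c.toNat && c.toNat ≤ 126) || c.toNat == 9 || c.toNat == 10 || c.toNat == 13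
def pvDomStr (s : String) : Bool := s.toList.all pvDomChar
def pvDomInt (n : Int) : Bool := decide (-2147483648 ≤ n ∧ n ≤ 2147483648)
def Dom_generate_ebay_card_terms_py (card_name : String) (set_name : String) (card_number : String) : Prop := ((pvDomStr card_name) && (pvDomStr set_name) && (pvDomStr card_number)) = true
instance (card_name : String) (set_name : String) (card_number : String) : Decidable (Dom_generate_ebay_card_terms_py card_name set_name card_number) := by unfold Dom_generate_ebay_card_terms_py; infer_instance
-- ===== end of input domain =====

-- ===== PORT A =====
-- Port of A: accumulator list, dead base_search kept, three append blocks, foldl grading loop.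
def generate_ebay_card_terms_py (card_name : String) (set_name : String) (card_number : String) : List String :=
  let terms : List String := []
  let base_search := card_name
  let base_search := if card_number ≠ "" then base_search ++ " " ++ card_number else base_search
  let _base_search := if set_name ≠ "" then base_search ++ " " ++ set_name else base_search
  let terms :=
    if set_name ≠ "" ∧ card_number ≠ "" then
      ((terms ++ [card_name ++ " " ++ card_number ++ " " ++ set_name ++ " near mint"])
        ++ [card_name ++ " " ++ card_number ++ " " ++ set_name ++ " nm"])
        ++ [card_name ++ " " ++ card_number ++ " " ++ set_name ++ " mint"]
    else terms
  let grading_terms := ["psa 10", "psa 9", "bgs 10", "cgc 10"]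
  let terms := grading_terms.foldl (fun terms grade =>
    if set_name ≠ "" ∧ card_number ≠ "" then
      terms ++ [card_name ++ " " ++ card_number ++ " " ++ set_name ++ " " ++ grade]
    else if set_name ≠ "" then
      terms ++ [card_name ++ " " ++ set_name ++ " " ++ grade]
    else terms) terms
  let terms :=
    if set_name ≠ "" ∧ card_number ≠ "" then
      terms ++ [card_name ++ " " ++ card_number ++ " " ++ set_name]
    else if set_name ≠ "" then
      terms ++ [card_name ++ " " ++ set_name]
    else terms
  terms

-- ===== PORT B =====
-- Port of B: one pass filtering a master suffix table; each kept term is built from its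
-- own token list and joined with " " (no prebuilt prefix, no per-case suffix list).
def pvConditionSuffixes : List String := ["near mint", "nm", "mint"]
def pvMasterSuffixes : List String := pvConditionSuffixes ++ ["psa 10", "psa 9", "bgs 10", "cgc 10", ""]

def generate_ebay_card_terms_py_alt (card_name : String) (set_name : String) (card_number : String) : List String :=
  pvMasterSuffixes.foldl (fun out suffix =>
    if set_name = "" then out
    else if card_number = "" ∧ suffix ∈ pvConditionSuffixes then out
    else
      let tokens := [card_name]
      let tokens := if card_number ≠ "" then tokens ++ [card_number] else tokens
      let tokens := tokens ++ [set_name]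
      let tokens := if suffix ≠ "" then tokens ++ [suffix] else tokens
      out ++ [PySem.Str.join " " tokens]) []

-- ===== PRECONDITION & SPEC =====
def Spec_generate_ebay_card_terms_py (card_name : String) (set_name : String) (card_number : String) (out : List String) : Prop := out = generate_ebay_card_terms_py_alt card_name set_name card_number
instance (card_name : String) (set_name : String) (card_number : String) (out : List String) : Decidable (Spec_generate_ebay_card_terms_py card_name set_name card_number out) := by unfold Spec_generate_ebay_card_terms_py; infer_instance

-- ===== CLAIM (what is proved, stated in full; the proofs are below) =====
def Claim_equal_generate_ebay_card_terms_py : Prop := ∀ (card_name : String) (set_name : String) (card_number : String), Dom_generate_ebay_card_terms_py card_name set_name card_number → Spec_generate_ebay_card_terms_py card_name set_name card_number (generate_ebay_card_terms_py card_name set_name card_number)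

-- ===== LEMMAS AND PROOFS =====
theorem pv_join3 (a b c : String) : PySem.Str.join " " [a, b, c] = a ++ " " ++ b ++ " " ++ c := by
  have h : (PySem.Str.join " " [a, b, c]).toList = (a ++ " " ++ b ++ " " ++ c).toList := by
    simp [PySem.Str.join, PySem.Chars.join, List.intercalate, List.intersperse]
  exact String.toList_injective h

theorem pv_join2 (a b : String) : PySem.Str.join " " [a, b] = a ++ " " ++ b := by
  have h : (PySem.Str.join " " [a, b]).toList = (a ++ " " ++ b).toList := by
    simp [PySem.Str.join, PySem.Chars.join, List.intercalate, List.intersperse]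
  exact String.toList_injective h

theorem pv_join4 (a b c d : String) : PySem.Str.join " " [a, b, c, d] = a ++ " " ++ b ++ " " ++ c ++ " " ++ d := by
  have h : (PySem.Str.join " " [a, b, c, d]).toList = (a ++ " " ++ b ++ " " ++ c ++ " " ++ d).toList := by
    simp [PySem.Str.join, PySem.Chars.join, List.intercalate, List.intersperse]
  exact String.toList_injective h

theorem pv_lit1 : (" " ++ "near mint" : String) = " near mint" := by decide
theorem pv_lit2 : (" " ++ "nm" : String) = " nm" := by decide
theorem pv_lit3 : (" " ++ "mint" : String) = " mint" := by decide

-- ===== VERDICT (by name: the statement is the Claim_ definition above) =====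
theorem generate_ebay_card_terms_py_spec : Claim_equal_generate_ebay_card_terms_py := by
  intro card_name set_name card_number _
  unfold Spec_generate_ebay_card_terms_py generate_ebay_card_terms_py generate_ebay_card_terms_py_alt
  by_cases hs : set_name = "" <;> by_cases hn : card_number = "" <;>
    simp [hs, hn, pvMasterSuffixes, pvConditionSuffixes, List.foldl,
      pv_join2, pv_join3, pv_join4, String.append_assoc, pv_lit1, pv_lit2, pv_lit3]
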